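-- pv_equiv track=rewrite | github.com/dilsatyegenoglu/vinifera_mirtrons | 6_supervalidator_stat.py | detect_stems
-- ===== SOURCE A (Python) =====
-- def detect_stems(db):
--     st=[]
--     cur=0
--     for c in db:
--         if c=="(":
--             cur+=1
--         else:
--             if cur>0: st.append(cur)
--             cur=0
--     if cur>0: st.append(cur)
--     return st
-- ===== SOURCE B (Python) =====
-- def detect_stems(db):
--     masked = "".join(c if c == "(" else " " for c in db)
--     return [len(tok) for tok in masked.split()]
-- ===== Notes on version B (the rewrite author's own statement) =====
-- stated objective: simpler
-- what changed: Replaces the manual counter-with-reset loop by two staged library passes: mask every non-open-paren character to a space, then str.split() the masked string and take the length of each token.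
import Mathlib
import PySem

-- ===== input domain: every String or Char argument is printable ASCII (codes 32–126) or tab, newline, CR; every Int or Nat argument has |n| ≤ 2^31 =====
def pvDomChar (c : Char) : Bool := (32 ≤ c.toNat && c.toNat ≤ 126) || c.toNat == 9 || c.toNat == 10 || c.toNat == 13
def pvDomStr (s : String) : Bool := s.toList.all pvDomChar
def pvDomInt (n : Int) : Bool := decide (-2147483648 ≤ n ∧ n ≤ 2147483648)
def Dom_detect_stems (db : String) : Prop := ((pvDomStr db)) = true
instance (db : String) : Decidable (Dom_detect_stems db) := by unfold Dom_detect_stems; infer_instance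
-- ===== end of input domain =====

-- B replaces A's counter-with-reset loop by two staged library passes (mask non-'(' chars
-- to spaces, then str.split() and take token lengths); same O(n) cost, values proved equal.

-- ===== PORT A =====
-- one step of A's loop body on the state (st, cur)
def detectStep (s : List Int × Int) (c : Char) : List Int × Int :=
  if c = '(' then (s.1, s.2 + 1)
  else if s.2 > 0 then (s.1 ++ [s.2], 0) else (s.1, 0)

def detect_stems (db : String) : List Int :=
  let p := db.toList.foldl detectStep ([], 0)
  if p.2 > 0 then p.1 ++ [p.2] else p.1

-- ===== PORT B =====
-- ported on the List Char side (PySem.Chars is the exact model of Python's str ops):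
-- "".join(c if c == "(" else " " for c in db)  →  Chars.join [] over the per-char pieces;
-- masked.split()  →  Chars.split₀;  len(tok)  →  token length as Int.
def detect_stems_alt (db : String) : List Int :=
  let masked := PySem.Chars.join []
    (db.toList.map (fun c => if c = '(' then [c] else [' ']))
  (PySem.Chars.split₀ masked).map (fun tok => (tok.length : Int))

-- ===== PRECONDITION & SPEC =====
def Spec_detect_stems (db : String) (out : List Int) : Prop := out = detect_stems_alt db
instance (db : String) (out : List Int) : Decidable (Spec_detect_stems db out) := by unfold Spec_detect_stems; infer_instance

-- ===== CLAIM (what is proved, stated in full; the proofs are below) =====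
def Claim_equal_detect_stems : Prop := ∀ (db : String), Dom_detect_stems db → Spec_detect_stems db (detect_stems db)

-- ===== LEMMAS AND PROOFS =====

def maskChar (c : Char) : Char := if c = '(' then c else ' '

theorem isspace_lparen : PySem.Chars.isspace '(' = false := by decide
theorem isspace_space : PySem.Chars.isspace ' ' = true := by decide

-- "".join is concatenation of the pieces
theorem join_nil_flatten (ps : List (List Char)) :
    PySem.Chars.join [] ps = ps.flatten := by
  induction ps with
  | nil => rfl
  | cons a t ih =>
    cases t with
    | nil => simp [PySem.Chars.join, List.intercalate]
    | cons b t' =>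
      simp only [PySem.Chars.join, List.intercalate, List.intersperse] at ih ⊢
      simp [ih]

-- joining the per-char pieces with "" is just mapping the mask over the characters
theorem join_mask (l : List Char) :
    PySem.Chars.join [] (l.map (fun c => if c = '(' then [c] else [' ']))
      = l.map maskChar := by
  rw [join_nil_flatten]
  have h : (fun c => if c = '(' then [c] else [' ']) = fun c => [maskChar c] := by
    funext c; by_cases hc : c = '(' <;> simp [maskChar, hc]
  rw [h]
  induction l with
  | nil => rfl
  | cons c rest ih => simp [ih]

def detectFinish (p : List Int × Int) : List Int :=
  if p.2 > 0 then p.1 ++ [p.2] else p.1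

-- the one invariant: A's loop state (st, k) corresponds to split₀.go's state on the
-- masked tail, with cur a list of length k and acc holding st reversed token-wise
theorem go_invariant (l : List Char) (st : List Int) (k : Nat)
    (curL : List Char) (accL : List (List Char))
    (hcur : curL.length = k)
    (hacc : accL.reverse.map (fun t => (t.length : Int)) = st) :
    detectFinish (l.foldl detectStep (st, (k : Int)))
      = (PySem.Chars.split₀.go (l.map maskChar) curL accL).map
          (fun t => (t.length : Int)) := by
  induction l generalizing st k curL accL with
  | nil =>
    simp only [List.foldl_nil, List.map_nil, PySem.Chars.split₀.go, detectFinish]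
    by_cases hk : k = 0
    · subst hk
      obtain rfl : curL = [] := List.eq_nil_of_length_eq_zero hcur
      simp [hacc]
    · have h1 : curL.isEmpty = false := by
        cases curL with
        | nil => simp at hcur; omega
        | cons a t => rfl
      have h2 : 0 < k := Nat.pos_of_ne_zero hk
      simp [h1, h2, hacc, hcur]
  | cons c rest ih =>
    simp only [List.foldl_cons, List.map_cons]
    by_cases hc : c = '('
    · subst hc
      rw [show detectStep (st, (k : Int)) '(' = (st, (k : Int) + 1) by simp [detectStep]]
      rw [show maskChar '(' = '(' from rfl]
      rw [show PySem.Chars.split₀.go ('(' :: rest.map maskChar) curL accL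
            = PySem.Chars.split₀.go (rest.map maskChar) ('(' :: curL) accL by
        rw [PySem.Chars.split₀.go]; simp [isspace_lparen]]
      have := ih st (k + 1) ('(' :: curL) accL (by simp [hcur]) hacc
      simpa [Nat.cast_add] using this
    · rw [show maskChar c = ' ' by simp [maskChar, hc]]
      rw [show PySem.Chars.split₀.go (' ' :: rest.map maskChar) curL accL
            = if curL.isEmpty then PySem.Chars.split₀.go (rest.map maskChar) [] accL
              else PySem.Chars.split₀.go (rest.map maskChar) [] (curL.reverse :: accL) by
        rw [PySem.Chars.split₀.go]; simp [isspace_space]]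
      by_cases hk : k = 0
      · subst hk
        obtain rfl : curL = [] := List.eq_nil_of_length_eq_zero hcur
        rw [show detectStep (st, ((0 : Nat) : Int)) c = (st, 0) by
          simp [detectStep, hc]]
        simpa using ih st 0 [] accL rfl hacc
      · have h1 : curL.isEmpty = false := by
          cases curL with
          | nil => simp at hcur; omega
          | cons a t => rfl
        rw [h1]
        rw [show detectStep (st, (k : Int)) c = (st ++ [(k : Int)], 0) by
          simp only [detectStep, if_neg hc]
          rw [if_pos (by exact_mod_cast Nat.pos_of_ne_zero hk)]]
        simpa using ih (st ++ [(k : Int)]) 0 [] (curL.reverse :: accL) rfl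
          (by simp [hacc, hcur])

-- ===== VERDICT (by name: the statement is the Claim_ definition above) =====
theorem detect_stems_spec : Claim_equal_detect_stems := by
  intro db _
  unfold Spec_detect_stems detect_stems detect_stems_alt
  rw [join_mask]
  simpa [detectFinish, PySem.Chars.split₀] using
    go_invariant db.toList [] 0 [] [] rfl rfl
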